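-- pv_equiv track=rewrite | github.com/CherryQqqqq5/ToolClaw | scripts/validate_toolsandbox_core_export.py | _runtime_messages_are_initial
-- ===== SOURCE A (Python) =====
-- from typing import Any, Dict, List, Mapping, Sequence
--
-- def _message_sender(message: Mapping[str, Any]) -> str:
--     return str(message.get("sender") or message.get("role") or "").strip().lower()
--
-- def _runtime_messages_are_initial(messages: Sequence[Any]) -> bool:
--     seen_user = False
--     for item in messages:
--         if not isinstance(item, dict):
--             return False
--         sender = _message_sender(item)
--         if seen_user:
--             return False
--         if sender in {"assistant", "tool", "execution_environment", "environment"}: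
--             return False
--         if sender == "user":
--             seen_user = True
--     return bool(messages)
-- ===== SOURCE B (Python) =====
-- from typing import Any, Mapping, Sequence
--
--
-- def _message_sender(message: Mapping[str, Any]) -> str:
--     return str(message.get("sender") or message.get("role") or "").strip().lower()
--
--
-- _FORBIDDEN = {"assistant", "tool", "execution_environment", "environment"}
--
--
-- def _runtime_messages_are_initial(messages: Sequence[Any]) -> bool:
--     if not messages:
--         return False
--     senders = []
--     for item in messages:
--         if not isinstance(item, dict):
--             return False
--         senders.append(_message_sender(item))
--     for i, sender in enumerate(senders):
--         if sender in _FORBIDDEN: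
--             return False
--         if sender == "user":
--             return i == len(senders) - 1
--     return True
-- ===== Notes on version B (the rewrite author's own statement) =====
-- stated objective: simpler
-- what changed: Replaces the carried seen_user flag with a validate-then-decide split: one pass collects senders, a second indexed pass decides directly, returning i == len-1 at the first 'user'.
import Mathlib
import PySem

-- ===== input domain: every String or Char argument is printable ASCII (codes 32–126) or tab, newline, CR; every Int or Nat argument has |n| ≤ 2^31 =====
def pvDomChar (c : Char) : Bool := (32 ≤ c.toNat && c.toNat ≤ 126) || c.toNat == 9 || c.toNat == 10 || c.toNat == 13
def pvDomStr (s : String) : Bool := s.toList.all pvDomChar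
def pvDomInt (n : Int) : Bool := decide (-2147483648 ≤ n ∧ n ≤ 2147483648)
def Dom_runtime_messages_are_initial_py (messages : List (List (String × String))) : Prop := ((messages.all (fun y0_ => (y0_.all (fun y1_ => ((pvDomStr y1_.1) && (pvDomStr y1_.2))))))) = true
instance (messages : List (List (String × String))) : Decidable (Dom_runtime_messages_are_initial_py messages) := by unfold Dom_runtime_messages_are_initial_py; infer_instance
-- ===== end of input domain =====

-- B replaces A's carried seen_user flag by a validate-then-decide split with a positional test
-- at the first 'user' (objective: simpler).

-- ===== PORT A =====
-- _message_sender: (message.get("sender") or message.get("role") or "").strip().lower();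
-- 'or' takes the second operand when the first is None or the empty string.
def pvMsgSender (m : List (String × String)) : String :=
  let a := (PySem.Dict.get? (PySem.Dict.mk m) "sender").getD ""
  let b := if a ≠ "" then a else (PySem.Dict.get? (PySem.Dict.mk m) "role").getD ""
  PySem.Str.lower (PySem.Str.strip b)

-- the for-loop of A with the seen_user accumulator; 'some b' = early return b, 'none' = loop finished
-- (the isinstance(item, dict) test is always true under the type convention: items are dicts)
def pvLoopA : List (List (String × String)) → Bool → Option Bool
  | [], _ => none
  | item :: rest, seen_user =>
    let sender := pvMsgSender item
    if seen_user then some false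
    else if sender = "assistant" ∨ sender = "tool" ∨ sender = "execution_environment" ∨ sender = "environment" then some false
    else pvLoopA rest (if sender = "user" then true else seen_user)

def runtime_messages_are_initial_py (messages : List (List (String × String))) : Bool :=
  match pvLoopA messages false with
  | some b => b
  | none => !messages.isEmpty   -- return bool(messages)

-- ===== PORT B =====
-- second pass of B: indexed scan over the collected senders
def pvLoopB : List String → Int → Int → Bool
  | [], _, _ => true
  | s :: rest, i, n =>
    if s = "assistant" ∨ s = "tool" ∨ s = "execution_environment" ∨ s = "environment" then false
    else if s = "user" then decide (i = n - 1)
    else pvLoopB rest (i + 1) n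

def runtime_messages_are_initial_py_alt (messages : List (List (String × String))) : Bool :=
  if messages.isEmpty then false
  else
    let senders := messages.map pvMsgSender
    pvLoopB senders 0 (senders.length : Int)

-- ===== PRECONDITION & SPEC =====
def Spec_runtime_messages_are_initial_py (messages : List (List (String × String))) (out : Bool) : Prop := out = runtime_messages_are_initial_py_alt messages
instance (messages : List (List (String × String))) (out : Bool) : Decidable (Spec_runtime_messages_are_initial_py messages out) := by unfold Spec_runtime_messages_are_initial_py; infer_instance

-- ===== CLAIM (what is proved, stated in full; the proofs are below) =====
def Claim_equal_runtime_messages_are_initial_py : Prop := ∀ (messages : List (List (String × String))), Dom_runtime_messages_are_initial_py messages → Spec_runtime_messages_are_initial_py messages (runtime_messages_are_initial_py messages)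

-- ===== LEMMAS AND PROOFS =====

-- once seen_user is set, A returns false at the next item, or falls through at the end
theorem pvLoopA_true (msgs : List (List (String × String))) :
    pvLoopA msgs true = if msgs = [] then none else some false := by
  cases msgs with
  | nil => rfl
  | cons m rest => simp [pvLoopA]

-- core invariant: A's remaining loop (flag still false) against B's indexed scan
theorem pvLoop_agree (msgs : List (List (String × String))) (i n : Int)
    (h : n = i + msgs.length) :
    (match pvLoopA msgs false with | some b => b | none => true)
      = pvLoopB (msgs.map pvMsgSender) i n := by
  induction msgs generalizing i with
  | nil => simp [pvLoopA, pvLoopB]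
  | cons m rest ih =>
    simp only [pvLoopA, pvLoopB, List.map_cons]
    by_cases hf : pvMsgSender m = "assistant" ∨ pvMsgSender m = "tool" ∨
        pvMsgSender m = "execution_environment" ∨ pvMsgSender m = "environment"
    · simp [hf]
    · simp only [hf, if_false]
      by_cases hu : pvMsgSender m = "user"
      · simp only [hu, if_true, pvLoopA_true]
        simp only [List.length_cons] at h
        by_cases hr : rest = []
        · subst hr
          simp only [List.length_nil] at h
          have : i = n - 1 := by omega
          simp [this]
        · have : i ≠ n - 1 := by
            have hlen : (1:Int) ≤ rest.length := by
              have := List.length_pos_iff.mpr hr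
              omega
            omega
          simp [hr, this]
      · simp only [if_neg hu]
        exact ih (i + 1) (by simp at h ⊢; omega)

-- ===== VERDICT (by name: the statement is the Claim_ definition above) =====
theorem runtime_messages_are_initial_py_spec : Claim_equal_runtime_messages_are_initial_py := by
  intro messages _
  unfold Spec_runtime_messages_are_initial_py runtime_messages_are_initial_py runtime_messages_are_initial_py_alt
  cases messages with
  | nil => rfl
  | cons m rest =>
    have h := pvLoop_agree (m :: rest) 0 ((m :: rest).length : Int) (by simp)
    simp only [List.isEmpty_cons, List.length_map, Bool.false_eq_true, if_false, Bool.not_false]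
    rw [← h]
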